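-- pv_equiv track=rewrite | github.com/ripthetoilet/crypto-FB-9 | cp2/Tverdokhlebov_fb-96_Sendetskyi-fb-96_cp2/main.py | popular
-- ===== SOURCE A (Python) =====
-- from collections import Counter
--
-- def popular(text, key_len):
--     l = []
--     for i in range(key_len):
--         j = 0
--         s = ''
--         while j < len(text) - key_len:
--             s += text[j+i]
--             j += key_len
--         x = Counter(s)
--         l.append(x.most_common(1)[0][0])
--     return l
-- ===== SOURCE B (Python) =====
-- from collections import Counter
--
-- def popular(text, key_len):
--     blocks = [text[p:p + key_len] for p in range(0, len(text) - key_len, key_len)]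
--     return [Counter(column).most_common(1)[0][0] for column in zip(*blocks)]
-- ===== Notes on version B (the rewrite author's own statement) =====
-- stated objective: idiomatic
-- what changed: B replaces A's per-column index loops (one scan with hand-maintained j stepping and string concatenation per key position) by the idiomatic decomposition: cut the text into key_len-sized blocks with a strided range, transpose them with zip(*blocks), and take each column's most common character; Pre_ excludes key_len = 0, where range's zero step is invalid (B raises ValueError while A returns []), and the inputs 0 < key_len where no complete block exists, on which A raises IndexError.
-- outside the precondition, e.g. on popular('ab', 0): A returns [], B raises ValueError
import Mathlib
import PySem

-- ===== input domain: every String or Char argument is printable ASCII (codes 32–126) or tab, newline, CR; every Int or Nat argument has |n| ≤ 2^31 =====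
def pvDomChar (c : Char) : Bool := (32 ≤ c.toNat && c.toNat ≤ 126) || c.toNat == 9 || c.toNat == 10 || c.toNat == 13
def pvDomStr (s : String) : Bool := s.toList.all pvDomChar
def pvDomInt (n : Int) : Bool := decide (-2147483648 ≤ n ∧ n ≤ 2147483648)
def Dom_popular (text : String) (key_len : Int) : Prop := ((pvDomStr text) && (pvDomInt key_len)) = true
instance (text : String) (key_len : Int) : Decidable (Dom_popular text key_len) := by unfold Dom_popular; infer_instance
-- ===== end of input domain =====

-- B restates A's per-column index loops as the idiomatic block/transpose decomposition
-- (strided blocks, zip(*blocks), most common per column); same cost, return value only.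

-- ===== PORT A =====
-- shared library helper: Counter(s).most_common(1)[0][0] — first key of maximal count
-- (first-insertion order = Python's max over dict items); getD ' ' is unreachable inside
-- Pre_ (Python raises IndexError on an empty counter, excluded by Pre_).
def pvMostCommon1 (s : List Char) : Char :=
  ((PySem.List.max? (PySem.Dict.counter s).items (fun kv => kv.2)).map Prod.fst).getD ' '

-- the inner 'while j < len(text) - key_len' loop; the '0 < key_len' conjunct is a pure
-- totality guard (the loop is only ever entered with i drawn from range(key_len), so key_len ≥ 1);
-- pyGetD ' ' is exact here: j+i is always in range when called from popular.
def popularLoop (cs : List Char) (key_len i j : Int) (s : List Char) : List Char :=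
  if _h : j < (cs.length : Int) - key_len ∧ 0 < key_len then
    popularLoop cs key_len i (j + key_len) (s ++ [PySem.List.pyGetD cs (j + i) ' '])
  else s
termination_by ((cs.length : Int) - key_len - j).toNat
decreasing_by omega

def popular (text : String) (key_len : Int) : List String :=
  (PySem.List.pyRange 0 key_len 1).foldl
    (fun l i => l ++ [String.mk [pvMostCommon1 (popularLoop text.toList key_len i 0 [])]]) []

-- ===== PORT B =====
-- termination measure for the zip(*blocks) transpose recursion (cited in decreasing_by)
def pvTails (bs : List (List Char)) : List (List Char) := bs.map List.tail

lemma pvTailSum_le (bs : List (List Char)) :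
    ((bs.map List.tail).map List.length).sum ≤ (bs.map List.length).sum := by
  induction bs with
  | nil => simp
  | cons b t ih =>
      simp only [List.map_cons, List.sum_cons]
      have hb : b.tail.length ≤ b.length := by rw [List.length_tail]; omega
      omega

lemma pvZipStarMeasure (bs : List (List Char))
    (h : ¬(bs = [] ∨ bs.any (fun b => b.isEmpty) = true)) :
    ((pvTails bs).map List.length).sum < (bs.map List.length).sum := by
  unfold pvTails
  push_neg at h
  obtain ⟨hne, hany⟩ := h
  cases bs with
  | nil => exact absurd rfl hne
  | cons b t =>
      have hb : b ≠ [] := by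
        intro e; subst e; simp at hany
      have hbl : b.tail.length < b.length := by
        rw [List.length_tail]
        cases b with
        | nil => exact absurd rfl hb
        | cons x xs => simp
      have := pvTailSum_le t
      simp only [List.map_cons, List.sum_cons]
      omega

-- zip(*blocks): while every block is nonempty, emit the heads and recurse on the tails
def pvZipStar (bs : List (List Char)) : List (List Char) :=
  if h : bs = [] ∨ bs.any (fun b => b.isEmpty) = true then []
  else (bs.map (fun b => b.headD ' ')) :: pvZipStar (pvTails bs)
termination_by (bs.map List.length).sum
decreasing_by exact pvZipStarMeasure bs h

def popular_alt (text : String) (key_len : Int) : List String :=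
  ((pvZipStar ((PySem.List.pyRange 0 ((text.toList.length : Int) - key_len) key_len).map
      (fun p => PySem.List.slice text.toList (some p) (some (p + key_len))))).map
    (fun column => String.mk [pvMostCommon1 column]))

-- ===== PRECONDITION & SPEC =====
-- Pre_ excludes key_len = 0, where a zero range step is invalid (A returns [] there while
-- B raises ValueError), and the inputs 0 < key_len with len(text) <= key_len, where every
-- column is empty and A raises IndexError on most_common(1)[0].
def Pre_popular (text : String) (key_len : Int) : Prop :=
  key_len ≠ 0 ∧ (key_len < 0 ∨ key_len < (text.toList.length : Int))
instance (text : String) (key_len : Int) : Decidable (Pre_popular text key_len) := by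
  unfold Pre_popular; infer_instance

def pvWitness_popular : String × Int := ("abcdef", 2)

def Spec_popular (text : String) (key_len : Int) (out : List String) : Prop := out = popular_alt text key_len
instance (text : String) (key_len : Int) (out : List String) : Decidable (Spec_popular text key_len out) := by unfold Spec_popular; infer_instance

-- ===== CLAIM (what is proved, stated in full; the proofs are below) =====
def Claim_equal_popular : Prop := ∀ (text : String) (key_len : Int), Dom_popular text key_len → Pre_popular text key_len → Spec_popular text key_len (popular text key_len)

-- ===== LEMMAS AND PROOFS =====

-- canonical column list: characters cs[j+i], cs[j+k+i], … while j + k < |cs|  (k = kp+1)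
def pvChain (cs : List Char) (kp i j : Nat) : List Char :=
  if j + (kp + 1) < cs.length then cs.getD (j + i) ' ' :: pvChain cs kp i (j + (kp + 1)) else []
termination_by cs.length - j

lemma pvChain_pos (cs : List Char) (kp i j : Nat) (h : j + (kp + 1) < cs.length) :
    pvChain cs kp i j = cs.getD (j + i) ' ' :: pvChain cs kp i (j + (kp + 1)) := by
  rw [pvChain, if_pos h]

lemma pvChain_neg (cs : List Char) (kp i j : Nat) (h : ¬ j + (kp + 1) < cs.length) :
    pvChain cs kp i j = [] := by
  rw [pvChain, if_neg h]

-- A's inner loop computes the canonical column list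
lemma popularLoop_eq_chain (cs : List Char) (kp : Nat) :
    ∀ (m j i : Nat) (s : List Char), cs.length ≤ j + m →
      popularLoop cs ((kp : Int) + 1) (i : Int) (j : Int) s = s ++ pvChain cs kp i j := by
  intro m
  induction m with
  | zero =>
      intro j i s hm
      rw [popularLoop, dif_neg (by push_cast; omega), pvChain_neg cs kp i j (by omega),
        List.append_nil]
  | succ m ih =>
      intro j i s hm
      by_cases hj : j + (kp + 1) < cs.length
      · rw [popularLoop, dif_pos (by constructor <;> [push_cast; skip] <;> omega)]
        have h1 : ((j : Int) + ((kp : Int) + 1)) = ((j + (kp + 1) : Nat) : Int) := by push_cast; ring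
        have h2 : ((j : Int) + (i : Int)) = ((j + i : Nat) : Int) := by push_cast; ring
        rw [h1, h2, PySem.List.pyGetD_natCast, ih (j + (kp + 1)) i _ (by omega),
          pvChain_pos cs kp i j hj]
        simp
      · rw [popularLoop, dif_neg (by push_cast; omega), pvChain_neg cs kp i j hj,
          List.append_nil]

-- the transpose of a nonempty rectangular block list, column by column
lemma pvZipStar_rect : ∀ (m : Nat) (bs : List (List Char)), bs ≠ [] →
    (∀ b ∈ bs, b.length = m) →
    pvZipStar bs = (List.range m).map (fun i => bs.map (fun b => b.getD i ' ')) := by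
  intro m
  induction m with
  | zero =>
      intro bs hne hlen
      have hg : bs = [] ∨ bs.any (fun b => b.isEmpty) = true := by
        right
        cases bs with
        | nil => exact absurd rfl hne
        | cons b t =>
            have hb : b = [] := List.length_eq_zero_iff.mp (hlen b (by simp))
            subst hb; simp
      rw [pvZipStar, dif_pos hg, List.range_zero, List.map_nil]
  | succ m ih =>
      intro bs hne hlen
      have hguard : ¬(bs = [] ∨ bs.any (fun b => b.isEmpty) = true) := by
        rintro (h | h)
        · exact hne h
        · rw [List.any_eq_true] at h
          obtain ⟨b, hb, hbe⟩ := h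
          rw [List.isEmpty_iff] at hbe
          have := hlen b hb
          subst hbe
          simp at this
      rw [pvZipStar, dif_neg hguard,
        ih (pvTails bs) (by simpa [pvTails] using hne)
          (by
            intro b hb
            simp only [pvTails, List.mem_map] at hb
            obtain ⟨a, ha, rfl⟩ := hb
            have := hlen a ha
            rw [List.length_tail, this]
            omega),
        List.range_succ_eq_map]
      simp only [pvTails, List.map_cons, List.map_map]
      congr 1
      · apply List.map_congr_left
        intro b hb
        have := hlen b hb
        cases b with
        | nil => simp at this
        | cons x xs => simp
      · apply List.map_congr_left
        intro i _
        simp only [Function.comp]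
        apply List.map_congr_left
        intro b hb
        have := hlen b hb
        cases b with
        | nil => simp at this
        | cons x xs => simp

-- the block count of range(0, n - k, k): t < M iff block t is complete before the cutoff
lemma pvM_char (n k : Nat) (hk1 : 1 ≤ k) (t : Nat) :
    t < (((n : Int) - 1) / (k : Int)).toNat ↔ k * t + k ≤ n - 1 := by
  have hK : (0 : Int) < (k : Int) := by exact_mod_cast hk1
  rw [Int.lt_toNat, Int.lt_iff_add_one_le, Int.le_ediv_iff_mul_le hK]
  have e : ((t : Int) + 1) * (k : Int) = ((k * t + k : Nat) : Int) := by push_cast; ring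
  rw [e]
  omega

-- a full block read column-wise
lemma pvBlock_getD (cs : List Char) (a k i : Nat) (hik : i < k) (h : a + k < cs.length) :
    ((cs.drop a).take k).getD i ' ' = cs.getD (a + i) ' ' := by
  have h1 : (a + i) < cs.length := by omega
  rw [List.getD, List.getD, List.getElem?_take, if_pos hik, List.getElem?_drop]

-- the strided starts yield exactly the canonical column list
lemma pvChainR (cs : List Char) (kp i : Nat) (M : Nat)
    (Hm : ∀ t, t < M ↔ (kp + 1) * t + (kp + 1) < cs.length) :
    ∀ (fuel t : Nat), M ≤ t + fuel →
      (List.range' t (M - t)).map (fun u => cs.getD ((kp + 1) * u + i) ' ')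
        = pvChain cs kp i ((kp + 1) * t) := by
  intro fuel
  induction fuel with
  | zero =>
      intro t hf
      have h0 : M - t = 0 := by omega
      rw [h0]
      have : ¬ (kp + 1) * t + (kp + 1) < cs.length := fun h => by
        have := (Hm t).mpr h; omega
      rw [pvChain_neg cs kp i _ this]
      rfl
  | succ fuel ih =>
      intro t hf
      by_cases ht : t < M
      · have hg : (kp + 1) * t + (kp + 1) < cs.length := (Hm t).mp ht
        have h1 : M - t = (M - (t + 1)) + 1 := by omega
        rw [h1, List.range'_succ, List.map_cons, pvChain_pos cs kp i _ hg]
        congr 1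
        have h2 : (kp + 1) * t + (kp + 1) = (kp + 1) * (t + 1) := by ring
        rw [h2, ← ih (t + 1) (by omega)]
      · have h0 : M - t = 0 := by omega
        rw [h0]
        have : ¬ (kp + 1) * t + (kp + 1) < cs.length := fun h => by
          have := (Hm t).mpr h; omega
        rw [pvChain_neg cs kp i _ this]
        rfl

-- empty strided range for a negative step with start ≤ stop
lemma pvRange_neg_nil (b s : Int) (hs : s < 0) (hb : 0 ≤ b) :
    PySem.List.pyRange 0 b s = [] := by
  rw [PySem.List.pyRange]
  rw [if_neg (by omega)]
  simp only
  rw [if_neg (by omega), if_neg (by omega)]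
  rfl

-- ===== VERDICT (by name: the statement is the Claim_ definition above) =====
theorem popular_spec : Claim_equal_popular := by
  intro text key_len hDom hPre
  unfold Spec_popular
  obtain ⟨hne, hPre⟩ := hPre
  set cs := text.toList with hcs
  rcases lt_or_gt_of_ne hne with hneg | hkpos
  · -- key_len < 0: both sides are []
    unfold popular popular_alt
    rw [PySem.List.pyRange_one_eq_nil (by omega),
      pvRange_neg_nil ((cs.length : Int) - key_len) key_len hneg (by omega)]
    rw [List.foldl_nil, List.map_nil, pvZipStar, dif_pos (Or.inl rfl)]
    rfl
  · -- 0 < key_len < len(text)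
    have hlt : key_len < (cs.length : Int) := by
      rcases hPre with h | h
      · omega
      · exact h
    obtain ⟨kp, hkp⟩ : ∃ kp : Nat, key_len = (kp : Int) + 1 :=
      ⟨(key_len - 1).toNat, by omega⟩
    subst hkp
    set k : Nat := kp + 1 with hk
    have hK : ((kp : Int) + 1) = ((k : Nat) : Int) := by push_cast; omega
    have hkn : k < cs.length := by omega
    set n : Nat := cs.length with hn
    set M : Nat := (((n : Int) - 1) / (k : Int)).toNat with hM
    have HmLe := pvM_char n k (by omega)
    have Hm : ∀ t, t < M ↔ k * t + k < n := by
      intro t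
      rw [hM, HmLe t]
      omega
    -- A side
    unfold popular
    rw [PySem.List.foldl_append_singleton_eq_map, List.nil_append, PySem.List.pyRange_one]
    have h0 : (((kp : Int) + 1) - 0).toNat = k := by omega
    rw [h0]
    -- B side
    unfold popular_alt
    rw [hK, PySem.List.pyRange_of_pos 0 ((n : Int) - (k : Int)) (by exact_mod_cast Nat.succ_pos kp)]
    rw [if_pos (by omega)]
    have hnum : ((n : Int) - (k : Int) - 0 + (k : Int) - 1) / (k : Int) = ((n : Int) - 1) / (k : Int) := by
      congr 1
      ring
    rw [hnum, ← hM]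
    have hblocks : ((List.range M).map (fun t : Nat => 0 + (k : Int) * (t : Int))).map
        (fun p => PySem.List.slice text.toList (some p) (some (p + (k : Int))))
        = (List.range M).map (fun t : Nat => (cs.drop (k * t)).take k) := by
      rw [List.map_map]
      apply List.map_congr_left
      intro t ht
      rw [List.mem_range] at ht
      simp only [Function.comp, zero_add]
      have e1 : (k : Int) * (t : Int) = ((k * t : Nat) : Int) := by push_cast; ring
      have e2 : (k : Int) * (t : Int) + (k : Int) = ((k * t : Nat) : Int) + ((k : Nat) : Int) := by
        push_cast; ring
      rw [e1] at e2 ⊢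
      rw [e2, ← hcs, PySem.List.slice_natCast_add]
    rw [hblocks]
    have hM0 : 0 < M := by
      rw [Hm 0]
      omega
    rw [pvZipStar_rect k _ (by
        intro h
        rw [List.map_eq_nil_iff, List.range_eq_nil] at h
        omega)
      (by
        intro b hb
        simp only [List.mem_map, List.mem_range] at hb
        obtain ⟨t, ht, rfl⟩ := hb
        have := (Hm t).mp ht
        rw [List.length_take, List.length_drop]
        omega)]
    rw [List.map_map, List.map_map]
    apply List.map_congr_left
    intro i hi
    rw [List.mem_range] at hi
    simp only [Function.comp]
    have hcol : (List.range M).map ((fun b => b.getD i ' ') ∘ fun t : Nat => (cs.drop (k * t)).take k)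
        = (List.range M).map (fun t : Nat => cs.getD (k * t + i) ' ') := by
      apply List.map_congr_left
      intro t ht
      rw [List.mem_range] at ht
      have := (Hm t).mp ht
      simp only [Function.comp]
      exact pvBlock_getD cs (k * t) k i hi (by omega)
    rw [List.map_map, hcol]
    have hchain := pvChainR cs kp i M (by intro t; exact Hm t) M 0 (by omega)
    simp only [Nat.sub_zero, Nat.mul_zero] at hchain
    rw [← List.range_eq_range'] at hchain
    rw [← hk] at hchain
    rw [hchain]
    have hloop := popularLoop_eq_chain cs kp n 0 i [] (by omega)
    simp only [List.nil_append, Nat.cast_zero] at hloop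
    rw [hK] at hloop
    have ei : (0 : Int) + (i : Int) = (i : Int) := by ring
    rw [← hcs, ei, hloop]
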